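-- pv_equiv track=rewrite | github.com/bohyunshin/Algorithm_training | 모비스/2.py | solution
-- ===== SOURCE A (Python) =====
-- from collections import defaultdict
--
-- def recursive(s, ans, index):
--     if s == 'a':
--         ans[index] = 1
--         return True
--     if (len(s) == 1 and s != 'a') or len(s) == 0:
--         if ans[index] != 1:
--             ans[index] = 0
--         return False
--
--     if s[0] == 'a':
--         recursive(s[1:], ans, index)
--     if s[-1] == 'a':
--         recursive(s[:-1], ans, index)
--     cnt = 0
--     for i, j in zip(s, s[::-1]):
--         if i == j == 'b':
--             cnt += 1
--         else:
--             break
--     if cnt >= 1: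
--         recursive(s[(cnt):(-cnt)], ans, index)
--
--     return
--
-- def solution(a):
--     ans = defaultdict(int)
--     for index, i in enumerate(a):
--         recursive(i, ans, int(index))
--     final_ans = []
--     for i in range(len(a)):
--         if i not in ans.keys():
--             final_ans.append(False)
--         elif ans[i] == 0:
--             final_ans.append(False)
--         elif ans[i] == 1:
--             final_ans.append(True)
--     return final_ans
-- ===== SOURCE B (Python) =====
-- def reduces(s):
--     # bottom-up DP over substrings s[i:j]: True iff s[i:j] reduces to 'a'
--     n = len(s)
--     dp = {}
--     for length in range(1, n + 1):
--         for i in range(0, n - length + 1):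
--             j = i + length
--             if length == 1:
--                 dp[(i, j)] = s[i] == 'a'
--             else:
--                 r = False
--                 if s[i] == 'a' and dp[(i + 1, j)]:
--                     r = True
--                 if s[j - 1] == 'a' and dp[(i, j - 1)]:
--                     r = True
--                 cnt = 0
--                 while cnt < length and s[i + cnt] == 'b' and s[j - 1 - cnt] == 'b':
--                     cnt += 1
--                 if cnt >= 1 and i + cnt < j - cnt and dp[(i + cnt, j - cnt)]:
--                     r = True
--                 dp[(i, j)] = r
--     return n >= 1 and dp[(0, n)]
--
-- def solution(a):
--     return [reduces(s) for s in a]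
-- ===== Notes on version B (the rewrite author's own statement) =====
-- stated objective: alternative
-- what changed: Replaces A's unmemoized top-down recursion over string slices that records results in a shared mutable answer dict by a bottom-up dynamic program over (i,j) substring indices, computing the reachability of 'a' for every substring exactly once.
import Mathlib
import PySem

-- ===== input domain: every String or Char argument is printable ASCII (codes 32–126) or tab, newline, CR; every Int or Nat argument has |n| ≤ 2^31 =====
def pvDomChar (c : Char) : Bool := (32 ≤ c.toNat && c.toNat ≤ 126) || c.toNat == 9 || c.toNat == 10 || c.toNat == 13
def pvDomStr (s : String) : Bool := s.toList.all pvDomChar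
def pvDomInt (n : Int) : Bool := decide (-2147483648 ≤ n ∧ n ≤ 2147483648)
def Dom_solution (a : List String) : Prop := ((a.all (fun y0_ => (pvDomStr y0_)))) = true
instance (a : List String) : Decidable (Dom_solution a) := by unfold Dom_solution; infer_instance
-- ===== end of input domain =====

-- B replaces A's unmemoized top-down recursion (with a shared answer dict) by a bottom-up DP over (i,j) substring indices; same return values.

-- ===== PORT A =====
-- 'for i, j in zip(s, s[::-1]): if i == j == 'b': cnt += 1 else: break' — prefix count over the zipped pairs
def pvCntA : List (Char × Char) → Nat
  | [] => 0
  | (i, j) :: t => if i = 'b' ∧ j = 'b' then pvCntA t + 1 else 0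

-- termination bound for recA's cnt-branch (cited in decreasing_by)
theorem pvCntA_le (l : List (Char × Char)) : pvCntA l ≤ l.length := by
  induction l with
  | nil => simp [pvCntA]
  | cons p t ih => obtain ⟨i, j⟩ := p; simp only [pvCntA]; split <;> simp <;> omega

-- in recA's final else-branch the string has length ≥ 2 (cited in decreasing_by)
theorem pvRecLen2 (s : List Char) (ha : ¬ s = ['a'])
    (h0 : ¬ ((s.length = 1 ∧ s ≠ ['a']) ∨ s.length = 0)) : 2 ≤ s.length := by
  push_neg at h0
  rcases h0 with ⟨h1, h2⟩
  by_cases hl : s.length = 1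
  · exact absurd (h1 hl) (by simpa using ha)
  · omega

-- 'def recursive(s, ans, index)' — returns the updated dict (Python mutates `ans` and its
-- True/None return value is never used by the caller)
def recA (s : List Char) (ans : PySem.Dict Int Int) (index : Int) : PySem.Dict Int Int :=
  if ha : s = ['a'] then ans.insert index 1
  else if h0 : (s.length = 1 ∧ s ≠ ['a']) ∨ s.length = 0 then
    if ans.getD index 0 ≠ 1 then ans.insert index 0 else ans
  else
    -- s[0] / s[-1]: exact, the string is nonempty here
    let ans1 := if PySem.List.pyGetD s 0 ' ' = 'a' then recA s.tail ans index else ans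
    let ans2 := if PySem.List.pyGetD s (-1) ' ' = 'a' then recA s.dropLast ans1 index else ans1
    let cnt := pvCntA (s.zip s.reverse)
    if hc : 1 ≤ cnt then
      recA (PySem.List.slice s (some (cnt : Int)) (some (-(cnt : Int)))) ans2 index
    else ans2
termination_by s.length
decreasing_by
  · have := pvRecLen2 s ha h0; simp [List.length_tail]; omega
  · have := pvRecLen2 s ha h0; simp [List.length_dropLast]; omega
  · have h2 := pvRecLen2 s ha h0
    have hle : pvCntA (s.zip s.reverse) ≤ s.length := by
      have := pvCntA_le (s.zip s.reverse); simpa using this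
    have hc' : 1 ≤ pvCntA (s.zip s.reverse) := by
      simp only [cnt, List.unattach_reverse, List.unattach_attach] at hc; exact hc
    simp only [List.unattach_reverse, List.unattach_attach]
    rw [PySem.List.length_slice, PySem.List.clampIdx_neg_natCast s.length _ (by omega), PySem.List.clampIdx_natCast]
    omega

def solution (a : List String) : List Bool :=
  let ans := (PySem.List.enumerate a).foldl (fun d p => recA p.2.toList d p.1) PySem.Dict.empty
  (PySem.List.pyRange 0 (a.length : Int) 1).foldl
    (fun acc i =>
      if ¬ ans.contains i then acc ++ [false]
      else if ans.getD i 0 = 0 then acc ++ [false]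
      else if ans.getD i 0 = 1 then acc ++ [true]
      else acc) []

-- ===== PORT B =====
-- 'cnt = 0; while cnt < length and s[i+cnt] == 'b' and s[j-1-cnt] == 'b': cnt += 1'
def pvCntB (s : List Char) (i j k : Int) : Int :=
  if h : k < j - i ∧ PySem.List.pyGetD s (i + k) ' ' = 'b' ∧ PySem.List.pyGetD s (j - 1 - k) ' ' = 'b'
  then pvCntB s i j (k + 1) else k
termination_by (j - i - k).toNat
decreasing_by omega

-- one cell of the DP table: dp[(i,j)] for the substring s[i:j] of length L = j - i ≥ 2
def pvCellB (s : List Char) (dp : PySem.Dict (Int × Int) Bool) (i j : Int) : Bool :=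
  let r1 := if PySem.List.pyGetD s i ' ' = 'a' ∧ dp.getD (i + 1, j) false = true then true else false
  let r2 := if PySem.List.pyGetD s (j - 1) ' ' = 'a' ∧ dp.getD (i, j - 1) false = true then true else r1
  let cnt := pvCntB s i j 0
  if 1 ≤ cnt ∧ i + cnt < j - cnt ∧ dp.getD (i + cnt, j - cnt) false = true then true else r2

def pvReducesB (s : List Char) : Bool :=
  let n : Int := (s.length : Int)
  let dp :=
    (PySem.List.pyRange 1 (n + 1) 1).foldl
      (fun dp L =>
        (PySem.List.pyRange 0 (n - L + 1) 1).foldl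
          (fun dp i =>
            let j := i + L
            if L = 1 then dp.insert (i, j) (decide (PySem.List.pyGetD s i ' ' = 'a'))
            else dp.insert (i, j) (pvCellB s dp i j))
          dp)
      PySem.Dict.empty
  -- 'return n >= 1 and dp[(0, n)]' (the key is always present when n ≥ 1)
  if 1 ≤ n then dp.getD (0, n) false else false

def solution_alt (a : List String) : List Bool := a.map (fun s => pvReducesB s.toList)

-- ===== PRECONDITION & SPEC =====
def Spec_solution (a : List String) (out : List Bool) : Prop := out = solution_alt a
instance (a : List String) (out : List Bool) : Decidable (Spec_solution a out) := by unfold Spec_solution; infer_instance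

-- ===== CLAIM (what is proved, stated in full; the proofs are below) =====
def Claim_equal_solution : Prop := ∀ (a : List String), Dom_solution a → Spec_solution a (solution a)

-- ===== LEMMAS AND PROOFS =====

-- Pure specification: can the string be reduced to 'a' by A's three moves?
def pvReach (s : List Char) : Bool :=
  if s = ['a'] then true
  else if s.length ≤ 1 then false
  else
    (decide (PySem.List.pyGetD s 0 ' ' = 'a') && pvReach s.tail) ||
    (decide (PySem.List.pyGetD s (-1) ' ' = 'a') && pvReach s.dropLast) ||
    (if hc : 1 ≤ pvCntA (s.zip s.reverse) then
       pvReach (PySem.List.slice s (some ((pvCntA (s.zip s.reverse) : Nat) : Int))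
                  (some (-((pvCntA (s.zip s.reverse) : Nat) : Int))))
     else false)
termination_by s.length
decreasing_by
  · simp [List.length_tail]; omega
  · simp [List.length_dropLast]; omega
  · rename_i h1 h2
    have hle : pvCntA (s.zip s.reverse) ≤ s.length := by
      have := pvCntA_le (s.zip s.reverse); simpa using this
    simp only [List.unattach_reverse, List.unattach_attach]
    rw [PySem.List.length_slice, PySem.List.clampIdx_neg_natCast s.length _ (by omega),
      PySem.List.clampIdx_natCast]
    omega

-- does the exploration ever hit a base case (a string of length ≤ 1)?
def pvHits (s : List Char) : Bool :=
  if s.length ≤ 1 then true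
  else
    (decide (PySem.List.pyGetD s 0 ' ' = 'a') && pvHits s.tail) ||
    (decide (PySem.List.pyGetD s (-1) ' ' = 'a') && pvHits s.dropLast) ||
    (if hc : 1 ≤ pvCntA (s.zip s.reverse) then
       pvHits (PySem.List.slice s (some ((pvCntA (s.zip s.reverse) : Nat) : Int))
                 (some (-((pvCntA (s.zip s.reverse) : Nat) : Int))))
     else false)
termination_by s.length
decreasing_by
  · simp [List.length_tail]; omega
  · simp [List.length_dropLast]; omega
  · rename_i h1
    have hle : pvCntA (s.zip s.reverse) ≤ s.length := by
      have := pvCntA_le (s.zip s.reverse); simpa using this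
    simp only [List.unattach_reverse, List.unattach_attach]
    rw [PySem.List.length_slice, PySem.List.clampIdx_neg_natCast s.length _ (by omega),
      PySem.List.clampIdx_natCast]
    omega

-- effect of one recursive(s, ans, index) call on ans[index]
def pvStep (r h : Bool) (v : Option Int) : Option Int :=
  if r then some 1 else if v = some 1 then some 1 else if h then some 0 else v

theorem pvStep_ff (v : Option Int) : pvStep false false v = v := by
  by_cases hv : v = some 1 <;> simp [pvStep, hv]

theorem pvStep_comp (r1 h1 r2 h2 : Bool) (v : Option Int) :
    pvStep r2 h2 (pvStep r1 h1 v) = pvStep (r1 || r2) (h1 || h2) v := by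
  cases r1 <;> cases r2 <;> cases h1 <;> cases h2 <;> by_cases hv : v = some 1 <;>
    simp [pvStep, hv]

-- pvReach/pvHits on base-case strings
theorem pvReach_a : pvReach ['a'] = true := by rw [pvReach]; simp

theorem pvReach_short (s : List Char) (hs1 : s ≠ ['a']) (hs : s.length ≤ 1) :
    pvReach s = false := by
  rw [pvReach]; simp [hs1, hs]

theorem pvHits_short (s : List Char) (hs : s.length ≤ 1) : pvHits s = true := by
  rw [pvHits]; simp [hs]

-- the dead-end update 'if ans[index] != 1: ans[index] = 0'
theorem pvDeadUpd (ans : PySem.Dict Int Int) (index k : Int) :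
    (if ans.getD index 0 ≠ 1 then ans.insert index 0 else ans).get? k
      = if k = index then pvStep false true (ans.get? index) else ans.get? k := by
  rw [PySem.Dict.getD_eq_get?_getD]
  by_cases hk : k = index
  · subst hk
    cases hv : ans.get? k with
    | none => simp [hv, pvStep, PySem.Dict.get?_insert]
    | some x =>
      by_cases hx : x = 1 <;> simp [hv, hx, pvStep, PySem.Dict.get?_insert]
  · cases hv : ans.get? index with
    | none => simp [hv, PySem.Dict.get?_insert, hk]
    | some x =>
      by_cases hx : x = 1 <;> simp [hv, hx, PySem.Dict.get?_insert, hk]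

-- MAIN A-side lemma: one call of recursive() acts on ans[index] as pvStep, and only there
theorem recA_get?_aux (n : Nat) : ∀ (s : List Char), s.length ≤ n →
    ∀ (ans : PySem.Dict Int Int) (index k : Int),
    (recA s ans index).get? k =
      if k = index then pvStep (pvReach s) (pvHits s) (ans.get? index) else ans.get? k := by
  induction n with
  | zero =>
    intro s hs ans index k
    have hnil : s = [] := List.eq_nil_of_length_eq_zero (by omega)
    subst hnil
    rw [recA]
    rw [pvReach_short [] (by simp) (by simp), pvHits_short [] (by simp)]
    simpa using pvDeadUpd ans index k
  | succ n ih =>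
    intro s hs ans index k
    rw [recA]
    by_cases ha : s = ['a']
    · rw [dif_pos ha, ha, pvReach_a]
      by_cases hk : k = index <;>
        simp [PySem.Dict.get?_insert, hk, pvStep]
    · rw [dif_neg ha]
      by_cases h0 : (s.length = 1 ∧ s ≠ ['a']) ∨ s.length = 0
      · rw [dif_pos h0]
        have hs1 : s.length ≤ 1 := by rcases h0 with ⟨h, _⟩ | h <;> omega
        rw [pvReach_short s ha hs1, pvHits_short s hs1]
        exact pvDeadUpd ans index k
      · rw [dif_neg h0]
        have h2 : 2 ≤ s.length := pvRecLen2 s ha h0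
        simp only [List.unattach_reverse, List.unattach_attach]
        have Htail : s.tail.length ≤ n := by simp [List.length_tail]; omega
        have Hdl : s.dropLast.length ≤ n := by simp [List.length_dropLast]; omega
        have hcle : pvCntA (s.zip s.reverse) ≤ s.length := by
          have := pvCntA_le (s.zip s.reverse); simpa using this
        -- branch 1
        have Q1 : ∀ k' : Int,
            (if PySem.List.pyGetD s 0 ' ' = 'a' then recA s.tail ans index else ans).get? k' =
              if k' = index then
                pvStep (decide (PySem.List.pyGetD s 0 ' ' = 'a') && pvReach s.tail)
                  (decide (PySem.List.pyGetD s 0 ' ' = 'a') && pvHits s.tail)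
                  (ans.get? index)
              else ans.get? k' := by
          intro k'
          by_cases hc1 : PySem.List.pyGetD s 0 ' ' = 'a'
          · rw [if_pos hc1, ih s.tail Htail]
            simp [hc1]
          · rw [if_neg hc1]
            simp [hc1, pvStep_ff]
            intro h; rw [h]
        -- branch 2
        have Q2 : ∀ k' : Int,
            (if PySem.List.pyGetD s (-1) ' ' = 'a' then
                recA s.dropLast
                  (if PySem.List.pyGetD s 0 ' ' = 'a' then recA s.tail ans index else ans) index
              else
                (if PySem.List.pyGetD s 0 ' ' = 'a' then recA s.tail ans index else ans)).get? k' =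
              if k' = index then
                pvStep
                  ((decide (PySem.List.pyGetD s 0 ' ' = 'a') && pvReach s.tail) ||
                    (decide (PySem.List.pyGetD s (-1) ' ' = 'a') && pvReach s.dropLast))
                  ((decide (PySem.List.pyGetD s 0 ' ' = 'a') && pvHits s.tail) ||
                    (decide (PySem.List.pyGetD s (-1) ' ' = 'a') && pvHits s.dropLast))
                  (ans.get? index)
              else ans.get? k' := by
          intro k'
          by_cases hc2 : PySem.List.pyGetD s (-1) ' ' = 'a'
          · rw [if_pos hc2, ih s.dropLast Hdl]
            rw [Q1 index]
            simp only [eq_self_iff_true, if_true]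
            by_cases hk : k' = index
            · rw [if_pos hk, if_pos hk, pvStep_comp]
              simp [hc2]
            · rw [if_neg hk, if_neg hk, Q1 k', if_neg hk]
          · rw [if_neg hc2, Q1 k']
            by_cases hk : k' = index
            · rw [if_pos hk, if_pos hk]
              congr 1 <;> simp [hc2]
            · rw [if_neg hk, if_neg hk]
        -- branch 3 and assembly
        by_cases hc : 1 ≤ pvCntA (s.zip s.reverse)
        · have Hmid : (PySem.List.slice s (some ((pvCntA (s.zip s.reverse) : Nat) : Int))
              (some (-((pvCntA (s.zip s.reverse) : Nat) : Int)))).length ≤ n := by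
            rw [PySem.List.length_slice, PySem.List.clampIdx_neg_natCast s.length _ (by omega),
              PySem.List.clampIdx_natCast]
            omega
          rw [dif_pos hc, ih _ Hmid, Q2 index]
          have hR : pvReach s =
              ((decide (PySem.List.pyGetD s 0 ' ' = 'a') && pvReach s.tail ||
                decide (PySem.List.pyGetD s (-1) ' ' = 'a') && pvReach s.dropLast) ||
               pvReach (PySem.List.slice s (some ((pvCntA (s.zip s.reverse) : Nat) : Int))
                 (some (-((pvCntA (s.zip s.reverse) : Nat) : Int))))) := by
            rw [pvReach, if_neg ha, if_neg (by omega : ¬ s.length ≤ 1)]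
            rw [dif_pos hc]
          have hH : pvHits s =
              ((decide (PySem.List.pyGetD s 0 ' ' = 'a') && pvHits s.tail ||
                decide (PySem.List.pyGetD s (-1) ' ' = 'a') && pvHits s.dropLast) ||
               pvHits (PySem.List.slice s (some ((pvCntA (s.zip s.reverse) : Nat) : Int))
                 (some (-((pvCntA (s.zip s.reverse) : Nat) : Int))))) := by
            rw [pvHits, if_neg (by omega : ¬ s.length ≤ 1)]
            rw [dif_pos hc]
          simp only [eq_self_iff_true, if_true]
          by_cases hk : k = index
          · rw [if_pos hk, if_pos hk, pvStep_comp, hR, hH]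
          · rw [if_neg hk, if_neg hk, Q2 k, if_neg hk]
        · rw [dif_neg hc, Q2 k]
          have hR : pvReach s =
              (decide (PySem.List.pyGetD s 0 ' ' = 'a') && pvReach s.tail ||
                decide (PySem.List.pyGetD s (-1) ' ' = 'a') && pvReach s.dropLast) := by
            rw [pvReach, if_neg ha, if_neg (by omega : ¬ s.length ≤ 1)]
            rw [dif_neg hc]
            simp
          have hH : pvHits s =
              (decide (PySem.List.pyGetD s 0 ' ' = 'a') && pvHits s.tail ||
                decide (PySem.List.pyGetD s (-1) ' ' = 'a') && pvHits s.dropLast) := by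
            rw [pvHits, if_neg (by omega : ¬ s.length ≤ 1)]
            rw [dif_neg hc]
            simp
          rw [hR, hH]

theorem recA_get? (s : List Char) (ans : PySem.Dict Int Int) (index k : Int) :
    (recA s ans index).get? k =
      if k = index then pvStep (pvReach s) (pvHits s) (ans.get? index) else ans.get? k :=
  recA_get?_aux s.length s le_rfl ans index k

-- the enumerate-fold in solution: each recursive() call touches only its own index
theorem pvFoldGet? (l : List String) : ∀ (st : Int) (d : PySem.Dict Int Int) (k : Int),
    ((PySem.List.enumerate l st).foldl (fun d p => recA p.2.toList d p.1) d).get? k =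
      if st ≤ k ∧ k < st + l.length then
        pvStep (pvReach ((l.getD (k - st).toNat "").toList))
          (pvHits ((l.getD (k - st).toNat "").toList)) (d.get? k)
      else d.get? k := by
  induction l with
  | nil =>
    intro st d k
    rw [PySem.List.enumerate_nil, if_neg (by simp)]
    rfl
  | cons x xs ih =>
    intro st d k
    rw [PySem.List.enumerate_cons]
    simp only [List.foldl_cons]
    rw [ih (st + 1) (recA x.toList d st) k, recA_get? x.toList d st k]
    by_cases hk : k = st
    · subst hk
      rw [if_neg (by simp), if_pos rfl, if_pos (by simp)]
      simp
    · have hlen : (((x :: xs).length : Nat) : Int) = (xs.length : Int) + 1 := by simp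
      by_cases hin : st + 1 ≤ k ∧ k < st + 1 + (xs.length : Int)
      · rw [if_pos (by omega), if_neg hk,
          if_pos (by omega)]
        have hidx : (k - st).toNat = (k - (st + 1)).toNat + 1 := by omega
        rw [hidx, List.getD_cons_succ]
      · rw [if_neg (by omega), if_neg hk,
          if_neg (by omega)]

-- (range n).map over getD collapses to map over the list
theorem pvMapRangeGetD (l : List String) :
    (List.range l.length).map (fun m => pvReach ((l.getD m "").toList)) =
      l.map (fun x => pvReach x.toList) := by
  apply List.ext_getElem
  · simp
  · intro m h1 h2
    simp only [List.getElem_map, List.getElem_range]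
    rw [List.getD_eq_getElem l "" (by simpa using h1)]

-- A computes pvReach pointwise
theorem pvSolutionA (a : List String) : solution a = a.map (fun x => pvReach x.toList) := by
  unfold solution
  have hans : ∀ k : Int,
      ((PySem.List.enumerate a).foldl (fun d p => recA p.2.toList d p.1)
          PySem.Dict.empty).get? k =
        if 0 ≤ k ∧ k < (a.length : Int) then
          pvStep (pvReach ((a.getD k.toNat "").toList)) (pvHits ((a.getD k.toNat "").toList)) none
        else none := by
    intro k
    have := pvFoldGet? a 0 PySem.Dict.empty k
    simpa [PySem.Dict.get?_empty] using this
  rw [PySem.List.foldl_congr_mem _ _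
    (fun acc i => acc ++ [pvReach ((a.getD i.toNat "").toList)]) []
    (by
      intro acc i hi
      obtain ⟨h0, h1⟩ := PySem.List.mem_pyRange_one.mp hi
      have hget := hans i
      rw [if_pos ⟨h0, h1⟩] at hget
      rw [PySem.Dict.contains_eq_isSome_get?, hget, PySem.Dict.getD_eq_get?_getD, hget]
      cases hr : pvReach ((a.getD i.toNat "").toList) with
      | true => simp only [List.getD_eq_getElem?_getD] at hr; simp [pvStep, hr]
      | false =>
        cases hh : pvHits ((a.getD i.toNat "").toList) with
        | true =>
          simp only [List.getD_eq_getElem?_getD] at hr hh; simp [pvStep, hr, hh]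
        | false =>
          simp only [List.getD_eq_getElem?_getD] at hr hh; simp [pvStep, hr, hh])]
  rw [PySem.List.foldl_append_singleton_eq_map]
  rw [PySem.List.pyRange_zero_nat, List.map_map]
  simpa using pvMapRangeGetD a

-- ===== B-side: substring toolbox =====

theorem pvSliceMid (s : List Char) (c : Nat) (h1 : 1 ≤ c) (h2 : c ≤ s.length) :
    PySem.List.slice s (some (c : Int)) (some (-(c : Int))) = (s.drop c).take (s.length - 2 * c) := by
  rw [PySem.List.slice, PySem.List.clampIdx_neg_natCast s.length c (by omega),
    PySem.List.clampIdx_natCast, Nat.min_eq_left h2]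
  congr 1
  omega

theorem pvGetDLast (s : List Char) (d : Char) (h : s ≠ []) :
    PySem.List.pyGetD s (-1) d = s.getD (s.length - 1) d := by
  rw [PySem.List.pyGetD_neg_one s d h, List.getLast_eq_getElem,
    List.getD_eq_getElem s d (by have := List.length_pos_iff.mpr h; omega)]

theorem pvSubLen (s : List Char) (i L : Nat) (h : i + L ≤ s.length) :
    ((s.drop i).take L).length = L := by
  simp [List.length_take, List.length_drop]; omega

theorem pvSubGetD (s : List Char) (i L m : Nat) (hm : m < L) (h : i + L ≤ s.length) :
    ((s.drop i).take L).getD m ' ' = s.getD (i + m) ' ' := by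
  rw [List.getD_eq_getElem _ ' ' (by rw [pvSubLen s i L h]; omega),
    List.getD_eq_getElem s ' ' (by omega), List.getElem_take, List.getElem_drop]

theorem pvSubTail (s : List Char) (i L : Nat) :
    ((s.drop i).take L).tail = (s.drop (i + 1)).take (L - 1) := by
  rw [← List.drop_one, List.drop_take, List.drop_drop]

theorem pvSubDropLast (s : List Char) (i L : Nat) (h : i + L ≤ s.length) :
    ((s.drop i).take L).dropLast = (s.drop i).take (L - 1) := by
  rw [List.dropLast_eq_take, pvSubLen s i L h, List.take_take, Nat.min_eq_left (by omega)]

theorem pvSubMid (s : List Char) (i L c : Nat) :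
    (((s.drop i).take L).drop c).take (L - 2 * c) = (s.drop (i + c)).take (L - 2 * c) := by
  rw [List.drop_take, List.drop_drop, List.take_take, Nat.min_eq_left (by omega)]

theorem pvSubOne (s : List Char) (i : Nat) (h : i < s.length) :
    (s.drop i).take 1 = [s.getD i ' '] := by
  rw [List.take_one, List.head?_drop, List.getD_eq_getElem s ' ' h]
  simp [List.getElem?_eq_getElem h]

theorem pvReachSingle (s : List Char) (i : Nat) (h : i < s.length) :
    pvReach ((s.drop i).take 1) = decide (s.getD i ' ' = 'a') := by
  rw [pvSubOne s i h, pvReach]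
  by_cases hc : s.getD i ' ' = 'a' <;> simp [hc]

-- B's while-loop cnt equals A's zip-prefix cnt on the substring s[i:i+L]
theorem pvCntB_aux (s : List Char) (i L : Nat) (hij : i + L ≤ s.length) :
    ∀ (m k : Nat), k + m = L →
      pvCntB s (i : Int) ((i + L : Nat) : Int) (k : Int) =
        (k : Int) + (pvCntA ((((s.drop i).take L).zip ((s.drop i).take L).reverse).drop k) : Int) := by
  intro m
  induction m with
  | zero =>
    intro k hk
    rw [pvCntB]
    rw [dif_neg (by push_cast; omega)]
    have hlen : (((s.drop i).take L).zip ((s.drop i).take L).reverse).length = L := by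
      simp [List.length_zip, pvSubLen s i L hij]
    rw [List.drop_of_length_le (by omega)]
    simp [pvCntA]
  | succ m ih =>
    intro k hk
    have hkL : k < L := by omega
    have hzlen : (((s.drop i).take L).zip ((s.drop i).take L).reverse).length = L := by
      simp [List.length_zip, pvSubLen s i L hij]
    have hdropc := List.drop_eq_getElem_cons (l := ((s.drop i).take L).zip ((s.drop i).take L).reverse)
      (i := k) (by omega)
    have hz : (((s.drop i).take L).zip ((s.drop i).take L).reverse)[k]'(by omega) =
        (s[i + k]'(by omega), s[i + L - 1 - k]'(by omega)) := by
      rw [List.getElem_zip]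
      congr 1
      · rw [List.getElem_take, List.getElem_drop]
      · rw [List.getElem_reverse, List.getElem_take, List.getElem_drop]
        simp only [pvSubLen s i L hij]
        simp only [show i + (L - 1 - k) = i + L - 1 - k from by omega]
    have hg1 : PySem.List.pyGetD s ((i : Int) + (k : Int)) ' ' = s[i + k]'(by omega) := by
      rw [PySem.List.pyGetD_eq_getElem s ' ' (by omega) (by push_cast; omega)]
      simp only [show ((i : Int) + (k : Int)).toNat = i + k from by omega]
    have hg2 : PySem.List.pyGetD s (((i + L : Nat) : Int) - 1 - (k : Int)) ' ' =
        s[i + L - 1 - k]'(by omega) := by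
      rw [PySem.List.pyGetD_eq_getElem s ' ' (by push_cast; omega) (by push_cast; omega)]
      simp only [show (((i + L : Nat) : Int) - 1 - (k : Int)).toNat = i + L - 1 - k from by omega]
    rw [pvCntB]
    by_cases hb : s[i + k]'(by omega) = 'b' ∧ s[i + L - 1 - k]'(by omega) = 'b'
    · rw [dif_pos (by
        refine ⟨by push_cast; omega, ?_, ?_⟩
        · rw [hg1]; exact hb.1
        · rw [hg2]; exact hb.2)]
      have : ((k : Int) + 1) = ((k + 1 : Nat) : Int) := by push_cast; ring
      rw [this, ih (k + 1) (by omega)]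
      rw [hdropc, hz]
      simp only [pvCntA, if_pos hb]
      push_cast
      ring
    · rw [dif_neg (by
        intro hcond
        exact hb ⟨by rw [← hg1]; exact hcond.2.1, by rw [← hg2]; exact hcond.2.2⟩)]
      rw [hdropc, hz]
      simp only [pvCntA, if_neg hb]
      push_cast
      ring

theorem pvCntB_eq (s : List Char) (i L : Nat) (hij : i + L ≤ s.length) :
    pvCntB s (i : Int) ((i + L : Nat) : Int) 0 =
      (pvCntA (((s.drop i).take L).zip ((s.drop i).take L).reverse) : Int) := by
  have := pvCntB_aux s i L hij L 0 (by omega)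
  simpa using this

-- Boolean assembly of the three sequential 'if cond: r = True' statements
theorem pvAssemble2 (p1 p2 : Prop) [Decidable p1] [Decidable p2] (b1 b2 : Bool) :
    (if p2 ∧ b2 = true then true
     else if p1 ∧ b1 = true then true
     else false)
      = (decide p1 && b1 || decide p2 && b2) := by
  by_cases h1 : p1 <;> by_cases h2 : p2 <;> cases b1 <;> cases b2 <;> simp [h1, h2]

theorem pvAssemble (p1 p2 p3 : Prop) [Decidable p1] [Decidable p2] [Decidable p3]
    (b1 b2 b3 : Bool) :
    (if p3 ∧ b3 = true then true
     else if p2 ∧ b2 = true then true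
     else if p1 ∧ b1 = true then true
     else false)
      = (decide p1 && b1 || decide p2 && b2 || decide p3 && b3) := by
  by_cases h1 : p1 <;> by_cases h2 : p2 <;> by_cases h3 : p3 <;>
    cases b1 <;> cases b2 <;> cases b3 <;> simp [h1, h2, h3]

-- one DP cell computes pvReach of its substring
theorem pvCellB_eq (s : List Char) (i L : Nat) (h2 : 2 ≤ L) (hij : i + L ≤ s.length)
    (dp : PySem.Dict (Int × Int) Bool)
    (hdp : ∀ i' L' : Nat, 1 ≤ L' → L' ≤ L - 1 → i' + L' ≤ s.length →
      dp.get? ((i' : Int), ((i' + L' : Nat) : Int)) = some (pvReach ((s.drop i').take L'))) :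
    pvCellB s dp (i : Int) ((i + L : Nat) : Int) = pvReach ((s.drop i).take L) := by
  have hLlen : ((s.drop i).take L).length = L := pvSubLen s i L hij
  have htne : (s.drop i).take L ≠ ['a'] := by
    intro h; rw [h] at hLlen; simp at hLlen; omega
  have hczip : pvCntA (((s.drop i).take L).zip ((s.drop i).take L).reverse) ≤ L := by
    have h := pvCntA_le (((s.drop i).take L).zip ((s.drop i).take L).reverse)
    simpa [List.length_zip, hLlen] using h
  -- RHS unfolded once
  rw [pvReach, if_neg htne, if_neg (by rw [hLlen]; omega)]
  -- branch-by-branch value equations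
  have e_g1 : PySem.List.pyGetD s (i : Int) ' ' = s.getD i ' ' := by
    rw [PySem.List.pyGetD_natCast]
  have e_t0 : PySem.List.pyGetD ((s.drop i).take L) 0 ' ' = s.getD i ' ' := by
    rw [PySem.List.pyGetD_zero, pvSubGetD s i L 0 (by omega) hij, Nat.add_zero]
  have e_tail : ((s.drop i).take L).tail = (s.drop (i + 1)).take (L - 1) := pvSubTail s i L
  have e_d1 : dp.getD ((i : Int) + 1, ((i + L : Nat) : Int)) false =
      pvReach ((s.drop (i + 1)).take (L - 1)) := by
    have h := hdp (i + 1) (L - 1) (by omega) (by omega) (by omega)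
    rw [show ((i + 1) + (L - 1)) = i + L from by omega] at h
    rw [show ((i : Int) + 1) = (((i + 1 : Nat)) : Int) from by push_cast; ring]
    rw [PySem.Dict.getD_eq_get?_getD, h, Option.getD_some]
  have e_g2 : PySem.List.pyGetD s (((i + L : Nat) : Int) - 1) ' ' = s.getD (i + L - 1) ' ' := by
    rw [PySem.List.pyGetD_eq_getElem s ' ' (by push_cast; omega) (by push_cast; omega),
      List.getD_eq_getElem s ' ' (by omega)]
    simp only [show (((i + L : Nat) : Int) - 1).toNat = i + L - 1 from by omega]
  have e_tlast : PySem.List.pyGetD ((s.drop i).take L) (-1) ' ' = s.getD (i + L - 1) ' ' := by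
    rw [pvGetDLast _ ' ' (by intro h; rw [h] at hLlen; simp at hLlen; omega), hLlen,
      pvSubGetD s i L (L - 1) (by omega) hij, show i + (L - 1) = i + L - 1 from by omega]
  have e_dl : ((s.drop i).take L).dropLast = (s.drop i).take (L - 1) := pvSubDropLast s i L hij
  have e_d2 : dp.getD ((i : Int), ((i + L : Nat) : Int) - 1) false =
      pvReach ((s.drop i).take (L - 1)) := by
    have h := hdp i (L - 1) (by omega) (by omega) (by omega)
    rw [show (((i + L : Nat) : Int) - 1) = ((i + (L - 1) : Nat) : Int) from by push_cast; omega]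
    rw [PySem.Dict.getD_eq_get?_getD, h, Option.getD_some]
  have e_c : pvCntB s (i : Int) ((i + L : Nat) : Int) 0 =
      ((pvCntA (((s.drop i).take L).zip ((s.drop i).take L).reverse) : Nat) : Int) :=
    pvCntB_eq s i L hij
  -- unfold the cell and rewrite everything to common atoms
  unfold pvCellB
  simp only [e_g1, e_g2, e_c, e_d1, e_d2, e_t0, e_tlast, e_tail, e_dl]
  by_cases hc1 : 1 ≤ pvCntA (((s.drop i).take L).zip ((s.drop i).take L).reverse)
  · rw [dif_pos hc1, pvSliceMid _ _ hc1 (by rw [hLlen]; exact hczip), hLlen, pvSubMid]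
    by_cases hmid : 2 * pvCntA (((s.drop i).take L).zip ((s.drop i).take L).reverse) < L
    · have e_d3 : dp.getD
          ((i : Int) + (pvCntA (((s.drop i).take L).zip ((s.drop i).take L).reverse) : Int),
           ((i + L : Nat) : Int) - (pvCntA (((s.drop i).take L).zip ((s.drop i).take L).reverse) : Int))
          false =
          pvReach ((s.drop (i + pvCntA (((s.drop i).take L).zip ((s.drop i).take L).reverse))).take
            (L - 2 * pvCntA (((s.drop i).take L).zip ((s.drop i).take L).reverse))) := by
        have h := hdp (i + pvCntA (((s.drop i).take L).zip ((s.drop i).take L).reverse))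
          (L - 2 * pvCntA (((s.drop i).take L).zip ((s.drop i).take L).reverse))
          (by omega) (by omega) (by omega)
        rw [show ((i : Int) + (pvCntA (((s.drop i).take L).zip ((s.drop i).take L).reverse) : Int)) =
            (((i + pvCntA (((s.drop i).take L).zip ((s.drop i).take L).reverse) : Nat)) : Int) from by
          push_cast; ring]
        rw [show (((i + L : Nat) : Int) - (pvCntA (((s.drop i).take L).zip ((s.drop i).take L).reverse) : Int)) =
            (((i + pvCntA (((s.drop i).take L).zip ((s.drop i).take L).reverse)) +
              (L - 2 * pvCntA (((s.drop i).take L).zip ((s.drop i).take L).reverse)) : Nat) : Int) from by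
          push_cast; omega]
        rw [PySem.Dict.getD_eq_get?_getD, h, Option.getD_some]
      rw [e_d3]
      simp only [← and_assoc]
      rw [pvAssemble]
      have hcond : (1 ≤ (pvCntA (((s.drop i).take L).zip ((s.drop i).take L).reverse) : Int) ∧
          (i : Int) + (pvCntA (((s.drop i).take L).zip ((s.drop i).take L).reverse) : Int) <
            ((i + L : Nat) : Int) - (pvCntA (((s.drop i).take L).zip ((s.drop i).take L).reverse) : Int)) := by
        constructor <;> push_cast <;> omega
      have hlt : ((i : Int) + (pvCntA (((s.drop i).take L).zip ((s.drop i).take L).reverse) : Int) <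
          (i : Int) + (L : Int) - (pvCntA (((s.drop i).take L).zip ((s.drop i).take L).reverse) : Int)) := by
        omega
      simp [hcond, hlt]
    · have e_mid0 : (s.drop (i + pvCntA (((s.drop i).take L).zip ((s.drop i).take L).reverse))).take
          (L - 2 * pvCntA (((s.drop i).take L).zip ((s.drop i).take L).reverse)) = ([] : List Char) := by
        rw [show L - 2 * pvCntA (((s.drop i).take L).zip ((s.drop i).take L).reverse) = 0 from by omega]
        simp
      rw [e_mid0, pvReach_short [] (by simp) (by simp),
        if_neg (fun h => by have := h.2.1; push_cast at this; omega), pvAssemble2]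
      simp
  · rw [dif_neg hc1, if_neg (fun h => by have := h.1; push_cast at this; omega), pvAssemble2]
    simp

-- inner DP loop: after processing all i for a fixed length L, every entry up to L is correct
theorem pvInnerLoop (s : List Char) (L : Nat) (hL1 : 1 ≤ L) (hLn : L ≤ s.length) :
    ∀ (m : Nat) (i0 : Int) (dp : PySem.Dict (Int × Int) Bool),
      0 ≤ i0 → i0 + m = (s.length : Int) - (L : Int) + 1 →
      (∀ i' L' : Nat, 1 ≤ L' → L' ≤ L - 1 → i' + L' ≤ s.length →
          dp.get? ((i' : Int), ((i' + L' : Nat) : Int)) = some (pvReach ((s.drop i').take L'))) →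
      (∀ i' : Nat, (i' : Int) < i0 → i' + L ≤ s.length →
          dp.get? ((i' : Int), ((i' + L : Nat) : Int)) = some (pvReach ((s.drop i').take L))) →
      ∀ i' L' : Nat, 1 ≤ L' → L' ≤ L → i' + L' ≤ s.length →
        ((PySem.List.pyRange i0 ((s.length : Int) - (L : Int) + 1) 1).foldl
            (fun dp i =>
              if (L : Int) = 1 then
                dp.insert (i, i + (L : Int)) (decide (PySem.List.pyGetD s i ' ' = 'a'))
              else dp.insert (i, i + (L : Int)) (pvCellB s dp i (i + (L : Int)))) dp).get?
          ((i' : Int), ((i' + L' : Nat) : Int)) = some (pvReach ((s.drop i').take L')) := by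
  intro m
  induction m with
  | zero =>
    intro i0 dp h0 hm hprev hcur i' L' hL'1 hL'L hi'
    rw [PySem.List.pyRange_one_eq_nil (by omega)]
    simp only [List.foldl_nil]
    by_cases hLL : L' = L
    · subst hLL
      exact hcur i' (by omega) hi'
    · exact hprev i' L' hL'1 (by omega) hi'
  | succ m ih =>
    intro i0 dp h0 hm hprev hcur i' L' hL'1 hL'L hi'
    rw [PySem.List.pyRange_one_cons (by omega)]
    simp only [List.foldl_cons]
    have hiN : i0 = ((i0.toNat : Nat) : Int) := by omega
    have hiNlen : i0.toNat + L ≤ s.length := by omega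
    -- the inserted value is correct
    have hval :
        (if (L : Int) = 1 then
            dp.insert (i0, i0 + (L : Int)) (decide (PySem.List.pyGetD s i0 ' ' = 'a'))
          else dp.insert (i0, i0 + (L : Int)) (pvCellB s dp i0 (i0 + (L : Int)))) =
          dp.insert (i0, i0 + (L : Int)) (pvReach ((s.drop i0.toNat).take L)) := by
      by_cases h1 : (L : Int) = 1
      · rw [if_pos h1]
        have hL1' : L = 1 := by omega
        subst hL1'
        congr 1
        rw [pvReachSingle s i0.toNat (by omega), hiN, PySem.List.pyGetD_natCast]
        simp [show max i0 0 = i0 from by omega]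
      · rw [if_neg h1]
        congr 1
        rw [hiN, show ((i0.toNat : Nat) : Int) + (L : Int) = ((i0.toNat + L : Nat) : Int) from by
          push_cast; ring]
        exact pvCellB_eq s i0.toNat L (by omega) hiNlen dp hprev
    rw [hval]
    -- apply the IH to the extended dictionary
    refine ih (i0 + 1) (dp.insert (i0, i0 + (L : Int)) (pvReach ((s.drop i0.toNat).take L)))
      (by omega) (by omega) ?_ ?_ i' L' hL'1 hL'L hi'
    · intro a b hb1 hb2 hab
      rw [PySem.Dict.get?_insert, if_neg (by
        intro hkey
        have h1 := congrArg Prod.fst hkey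
        have h2 := congrArg Prod.snd hkey
        simp at h1 h2
        omega)]
      exact hprev a b hb1 hb2 hab
    · intro a ha hal
      by_cases haeq : (a : Int) = i0
      · rw [PySem.Dict.get?_insert, if_pos (by
          rw [Prod.mk.injEq]
          exact ⟨haeq, by push_cast; omega⟩)]
        have : a = i0.toNat := by omega
        rw [this]
      · rw [PySem.Dict.get?_insert, if_neg (by
          intro hkey
          have h1 := congrArg Prod.fst hkey
          simp at h1
          exact haeq h1)]
        exact hcur a (by omega) hal

-- outer DP loop over lengths
theorem pvOuterLoop (s : List Char) :
    ∀ (m : Nat) (L0 : Int) (dp : PySem.Dict (Int × Int) Bool),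
      1 ≤ L0 → L0 + m = (s.length : Int) + 1 →
      (∀ i' L' : Nat, 1 ≤ L' → (L' : Int) ≤ L0 - 1 → i' + L' ≤ s.length →
          dp.get? ((i' : Int), ((i' + L' : Nat) : Int)) = some (pvReach ((s.drop i').take L'))) →
      ∀ i' L' : Nat, 1 ≤ L' → L' ≤ s.length → i' + L' ≤ s.length →
        ((PySem.List.pyRange L0 ((s.length : Int) + 1) 1).foldl
            (fun dp L =>
              (PySem.List.pyRange 0 ((s.length : Int) - L + 1) 1).foldl
                (fun dp i =>
                  if L = 1 then dp.insert (i, i + L) (decide (PySem.List.pyGetD s i ' ' = 'a'))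
                  else dp.insert (i, i + L) (pvCellB s dp i (i + L))) dp) dp).get?
          ((i' : Int), ((i' + L' : Nat) : Int)) = some (pvReach ((s.drop i').take L')) := by
  intro m
  induction m with
  | zero =>
    intro L0 dp h1 hm hprev i' L' hL'1 hL's hi'
    rw [PySem.List.pyRange_one_eq_nil (by omega)]
    simp only [List.foldl_nil]
    exact hprev i' L' hL'1 (by push_cast; omega) hi'
  | succ m ih =>
    intro L0 dp h1 hm hprev i' L' hL'1 hL's hi'
    rw [PySem.List.pyRange_one_cons (by omega)]
    simp only [List.foldl_cons]
    have hLN : L0 = ((L0.toNat : Nat) : Int) := by omega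
    have hinner := pvInnerLoop s L0.toNat (by omega) (by omega)
      ((s.length : Int) - L0 + 1).toNat 0 dp le_rfl
      (by rw [← hLN]; omega)
      (by
        intro a b hb1 hb2 hab
        exact hprev a b hb1 (by omega) hab)
      (by intro a ha hab; omega)
    rw [← hLN] at hinner
    refine ih (L0 + 1) _ (by omega) (by omega) ?_ i' L' hL'1 hL's hi'
    intro a b hb1 hb2 hab
    exact hinner a b hb1 (by omega) hab

-- B computes pvReach on each string
theorem pvReducesB_eq (s : List Char) : pvReducesB s = pvReach s := by
  simp only [pvReducesB]
  by_cases hn : (1 : Int) ≤ (s.length : Int)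
  · rw [if_pos hn]
    have h := pvOuterLoop s s.length 1 PySem.Dict.empty (by omega) (by push_cast; omega)
      (by intro a b hb1 hb2 hab; omega)
      0 s.length (by omega) le_rfl (by omega)
    rw [PySem.Dict.getD_eq_get?_getD]
    simp only [Nat.cast_zero, Nat.zero_add, zero_add] at h
    rw [h, Option.getD_some, List.drop_zero, List.take_length]
  · rw [if_neg hn]
    have hs : s = [] := by
      have : s.length = 0 := by omega
      simpa [List.length_eq_zero_iff] using this
    rw [hs, pvReach_short [] (by simp) (by simp)]

theorem pvSolutionB (a : List String) :
    solution_alt a = a.map (fun x => pvReach x.toList) := by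
  unfold solution_alt
  exact List.map_congr_left (fun x _ => pvReducesB_eq x.toList)

-- ===== VERDICT (by name: the statement is the Claim_ definition above) =====
theorem solution_spec : Claim_equal_solution := by
  intro a _
  show solution a = solution_alt a
  rw [pvSolutionA, pvSolutionB]
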